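-- pv_equiv track=rewrite | github.com/Timenem/python_selen | quests/quest405.py | min_remove
-- ===== SOURCE A (Python) =====
-- def min_remove(A):
--     A = sorted(A)
--     sort_set = sorted(set(A))
--     len_list = len(A)
--     for i, x in enumerate(sort_set):
--         for j in range(i + 1):
--             if x <= sort_set[j] ** 2:
--                 len_list = min(len_list, A[::-1].index(x) + A.index(sort_set[j]))
--     return len_list
-- ===== SOURCE B (Python) =====
-- def min_remove(A):
--     # Two-pointer sweep over the sorted list: for each distinct value x (taken at
--     # its block of equal elements), the best partner y is the least value whose
--     # square reaches x, found by a monotone pointer j; candidate = (#elements > x) + j.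
--     A = sorted(A)
--     n = len(A)
--     best = n
--     i = 0
--     j = 0
--     while i < n:
--         x = A[i]
--         while A[j] * A[j] < x:
--             j += 1
--         while i + 1 < n and A[i + 1] == x:
--             i += 1
--         best = min(best, (n - 1 - i) + j)
--         i += 1
--     return best
-- ===== Notes on version B (the rewrite author's own statement) =====
-- stated objective: faster
-- what changed: Replaces the nested loop over all value pairs (with per-pair list reversal and linear .index scans) by a single two-pointer sweep over the sorted list: for each distinct value x the unique best partner y (the least value whose square reaches x) is tracked by a monotone pointer, so the pair enumeration and all index scans disappear.
import Mathlib
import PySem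

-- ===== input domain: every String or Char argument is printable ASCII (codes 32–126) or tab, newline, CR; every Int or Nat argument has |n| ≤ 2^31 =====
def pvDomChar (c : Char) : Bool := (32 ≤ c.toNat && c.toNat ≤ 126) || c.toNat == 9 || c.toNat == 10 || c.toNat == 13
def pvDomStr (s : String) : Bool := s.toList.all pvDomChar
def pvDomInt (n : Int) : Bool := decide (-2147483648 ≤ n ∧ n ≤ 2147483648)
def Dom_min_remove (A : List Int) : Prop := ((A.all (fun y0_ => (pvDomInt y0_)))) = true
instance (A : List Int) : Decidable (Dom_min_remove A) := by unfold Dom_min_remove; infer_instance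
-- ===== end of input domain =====

-- B replaces A's nested loop over value pairs (with per-pair list reversal and .index
-- scans) by a single two-pointer sweep over the sorted list (objective: faster).

-- ===== PORT A =====
-- literal port of A; the .getD 0 after index? is exact: x and sort_set[j] are
-- elements of A, so Python's .index never raises here
def min_remove (A0 : List Int) : Int :=
  let A := PySem.List.sorted A0 (fun x => x) false
  let sort_set := PySem.List.sorted (PySem.Set.ofList A) (fun x => x) false
  let len_list : Int := (A.length : Int)
  (PySem.List.enumerate sort_set 0).foldl (fun len_list ix =>
    (PySem.List.pyRange 0 (ix.1 + 1) 1).foldl (fun len_list j =>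
      if ix.2 ≤ (PySem.List.pyGetD sort_set j 0) ^ 2 then
        min len_list
          ((((PySem.List.index? ((PySem.List.slice? A none none (-1)).getD []) ix.2).getD 0 : Nat) : Int)
            + (((PySem.List.index? A (PySem.List.pyGetD sort_set j 0)).getD 0 : Nat) : Int))
      else len_list) len_list) len_list

-- ===== PORT B =====
-- Source B's inner `while A[j]*A[j] < x: j += 1`; on every reachable state the loop
-- stops before running off the end (x itself satisfies x ≤ x*x), so the
-- out-of-range branch (where Python would raise IndexError) is never taken
def pvBadv (A : List Int) (x : Int) (j : Nat) : Nat :=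
  if h : j < A.length then
    if A[j] * A[j] < x then pvBadv A x (j + 1) else j
  else j
termination_by A.length - j

-- Source B's `while i + 1 < n and A[i + 1] == x: i += 1`
def pvBlast (A : List Int) (x : Int) (i : Nat) : Nat :=
  if h : i + 1 < A.length then
    if A[i + 1] = x then pvBlast A x (i + 1) else i
  else i
termination_by A.length - i

theorem pvBlast_le (A : List Int) (x : Int) (i : Nat) : i ≤ pvBlast A x i := by
  unfold pvBlast
  split
  · split
    · have h := pvBlast_le A x (i + 1); omega
    · exact Nat.le_refl i
  · exact Nat.le_refl i
termination_by A.length - i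

-- Source B's outer `while i < n` loop, state (i, j, best); x = A[i], j' = pvBadv …, i' = pvBlast …
def pvBloop (A : List Int) (n : Int) (i j : Nat) (best : Int) : Int :=
  if h : i < A.length then
    pvBloop A n (pvBlast A A[i] i + 1) (pvBadv A A[i] j)
      (min best ((n - 1 - (pvBlast A A[i] i : Int)) + (pvBadv A A[i] j : Int)))
  else best
termination_by A.length - i
decreasing_by have := pvBlast_le A A[i] i; omega

def min_remove_alt (A0 : List Int) : Int :=
  let A := PySem.List.sorted A0 (fun x => x) false
  let n : Int := (A.length : Int)
  pvBloop A n 0 0 n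

-- ===== PRECONDITION & SPEC =====
def Spec_min_remove (A : List Int) (out : Int) : Prop := out = min_remove_alt A
instance (A : List Int) (out : Int) : Decidable (Spec_min_remove A out) := by unfold Spec_min_remove; infer_instance

-- ===== CLAIM (what is proved, stated in full; the proofs are below) =====
def Claim_equal_min_remove : Prop := ∀ (A : List Int), Dom_min_remove A → Spec_min_remove A (min_remove A)

-- ===== LEMMAS AND PROOFS =====

-- the shared specification fold: over the strictly sorted distinct values x,
-- minimize (#elements > x) + (least index of A' whose element squares to ≥ x)
def pvStep (A' : List Int) (b x : Int) : Int :=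
  min b (((A'.countP (fun a => decide (x < a)) : Nat) : Int)
    + ((A'.findIdx (fun v => decide (x ≤ v * v)) : Nat) : Int))

def pvSpec (A' : List Int) : Int :=
  (PySem.Set.ofList A').foldl (pvStep A') ((A'.length : Int))

lemma pv_int_le_sq (x : Int) : x ≤ x * x := by
  rcases Int.lt_or_le 0 x with h | h
  · nlinarith
  · exact h.trans (mul_self_nonneg x)

-- first-occurrence index of v in a sorted list = number of elements < v
lemma pv_index?_sorted (L : List Int) (hs : L.Pairwise (· ≤ ·)) (v : Int) (hv : v ∈ L) :
    PySem.List.index? L v = some (L.countP (fun a => decide (a < v))) := by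
  induction L with
  | nil => cases hv
  | cons h t ih =>
    rcases List.pairwise_cons.mp hs with ⟨hht, hts⟩
    by_cases hhv : h = v
    · subst hhv
      rw [PySem.List.index?_cons_self]
      have h0 : t.countP (fun a => decide (a < h)) = 0 :=
        List.countP_eq_zero.mpr (fun a ha => by
          simpa using not_lt.mpr (hht a ha))
      simp [List.countP_cons, h0]
    · have hvt : v ∈ t := by
        rcases List.mem_cons.mp hv with h' | h'
        · exact absurd h'.symm hhv
        · exact h'
      have hlt : h < v := lt_of_le_of_ne (hht v hvt) hhv
      rw [PySem.List.index?_cons_of_ne _ hhv, ih hts hvt]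
      simp [List.countP_cons, hlt]

-- index of v in the reverse of a sorted list = number of elements > v
lemma pv_index?_rev_sorted (L : List Int) (hs : L.Pairwise (· ≤ ·)) (v : Int) (hv : v ∈ L) :
    PySem.List.index? L.reverse v = some (L.countP (fun a => decide (v < a))) := by
  induction L using List.reverseRecOn with
  | nil => cases hv
  | append_singleton t u ih =>
    rcases List.pairwise_append.mp hs with ⟨ht, _, htu⟩
    have hrev : (t ++ [u]).reverse = u :: t.reverse := by simp
    rw [hrev]
    by_cases huv : u = v
    · subst huv
      rw [PySem.List.index?_cons_self]
      have h0 : t.countP (fun a => decide (u < a)) = 0 :=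
        List.countP_eq_zero.mpr (fun a ha => by
          simpa using not_lt.mpr (htu a ha u (List.mem_singleton_self u)))
      simp [List.countP_append, List.countP_cons, h0]
    · have hvt : v ∈ t := by
        rcases List.mem_append.mp hv with h' | h'
        · exact h'
        · exact absurd (List.mem_singleton.mp h').symm huv
      have hlt : v < u := lt_of_le_of_ne (htu v hvt u (List.mem_singleton_self u)) (fun h => huv h.symm)
      rw [PySem.List.index?_cons_of_ne _ huv, ih ht hvt]
      simp [List.countP_append, List.countP_cons, hlt]

-- my own findIdx characterizations
lemma pv_findIdx_spec (l : List Int) (p : Int → Bool)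
    (h : ∃ (m : Nat) (hm : m < l.length), p l[m]) :
    ∃ (hlt : l.findIdx p < l.length), p (l[l.findIdx p]'hlt)
      ∧ ∀ (m : Nat) (hm : m < l.length), m < l.findIdx p → ¬ p l[m] := by
  induction l with
  | nil => rcases h with ⟨m, hm, _⟩; cases hm
  | cons a t ih =>
    by_cases ha : p a
    · refine ⟨by simp [List.findIdx_cons, ha], by simpa [List.findIdx_cons, ha] using ha, ?_⟩
      intro m hm hlt
      simp [List.findIdx_cons, ha] at hlt
    · have hex : ∃ (m : Nat) (hm : m < t.length), p t[m] := by
        rcases h with ⟨m, hm, hp⟩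
        cases m with
        | zero => exact absurd hp ha
        | succ k => exact ⟨k, by simpa using hm, by simpa using hp⟩
      rcases ih hex with ⟨h1, h2, h3⟩
      refine ⟨by simp only [List.findIdx_cons, Bool.cond_eq_ite, if_neg ha, List.length_cons]; omega,
        by simpa [List.findIdx_cons, ha] using h2, ?_⟩
      intro m hm hlt
      cases m with
      | zero => simpa using ha
      | succ k =>
        simp only [List.findIdx_cons, ha, cond_false] at hlt
        exact h3 k (by simpa using hm) (by omega)

lemma pv_findIdx_eq (l : List Int) (p : Int → Bool) (j : Nat) (hj : j < l.length)
    (h1 : p l[j]) (h2 : ∀ (m : Nat) (hm : m < l.length), m < j → ¬ p l[m]) :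
    l.findIdx p = j := by
  induction l generalizing j with
  | nil => cases hj
  | cons a t ih =>
    cases j with
    | zero => simp_all [List.findIdx_cons]
    | succ k =>
      have ha : ¬ p a := by simpa using h2 0 (by omega) (by omega)
      simp only [List.findIdx_cons, Bool.cond_eq_ite, if_neg ha]
      have := ih (j := k) (by simpa using hj) (by simpa using h1)
        (fun m hm hmk => by simpa using h2 (m + 1) (by simpa using hm) (by omega))
      omega

-- countP of a prefix-true/suffix-false split
lemma pv_countP_block (l : List Int) (p : Int → Bool) (j : Nat) (hle : j ≤ l.length)
    (h1 : ∀ (m : Nat) (hm : m < l.length), m < j → p l[m])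
    (h2 : ∀ (m : Nat) (hm : m < l.length), j ≤ m → ¬ p l[m]) :
    l.countP p = j := by
  induction l generalizing j with
  | nil => simp at hle ⊢; omega
  | cons a t ih =>
    cases j with
    | zero =>
      refine List.countP_eq_zero.mpr (fun x hx => ?_)
      rcases List.mem_iff_getElem.mp hx with ⟨m, hm, rfl⟩
      exact h2 m hm (by omega)
    | succ k =>
      have ha : p a := h1 0 (by simp) (by omega)
      rw [List.countP_cons, ih (j := k) (by simpa using hle)
        (fun m hm hmk => by simpa using h1 (m + 1) (by simpa using hm) (by omega))
        (fun m hm hmk => by simpa using h2 (m + 1) (by simpa using hm) (by omega))]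
      simp [ha]

-- countP of a prefix-false/suffix-true split
lemma pv_countP_suffix (l : List Int) (p : Int → Bool) (j : Nat) (hle : j ≤ l.length)
    (h1 : ∀ (m : Nat) (hm : m < l.length), m < j → ¬ p l[m])
    (h2 : ∀ (m : Nat) (hm : m < l.length), j ≤ m → p l[m]) :
    l.countP p = l.length - j := by
  induction l generalizing j with
  | nil => simp
  | cons a t ih =>
    cases j with
    | zero =>
      rw [List.countP_eq_length.mpr (fun x hx => ?_)]
      · simp
      · rcases List.mem_iff_getElem.mp hx with ⟨m, hm, rfl⟩
        exact h2 m hm (by omega)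
    | succ k =>
      have ha : ¬ p a := h1 0 (by simp) (by omega)
      rw [List.countP_cons, ih (j := k) (by simpa using hle)
        (fun m hm hmk => by simpa using h1 (m + 1) (by simpa using hm) (by omega))
        (fun m hm hmk => by simpa using h2 (m + 1) (by simpa using hm) (by omega))]
      simp [ha]

-- generic min-fold lemmas
lemma pv_foldl_if_min (p : Int → Prop) [DecidablePred p] (g : Int → Int) :
    ∀ (T : List Int) (b : Int),
      T.foldl (fun b y => if p y then min b (g y) else b) b
        = ((T.filter (fun y => decide (p y))).map g).foldl min b := by
  intro T
  induction T with
  | nil => intro b; rfl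
  | cons y t ih =>
    intro b
    by_cases hy : p y
    · have hfy : List.filter (fun y => decide (p y)) (y :: t)
          = y :: List.filter (fun y => decide (p y)) t :=
        List.filter_cons_of_pos (by simpa using hy)
      rw [List.foldl_cons, if_pos hy, hfy, List.map_cons, List.foldl_cons]
      exact ih (min b (g y))
    · have hfy : List.filter (fun y => decide (p y)) (y :: t)
          = List.filter (fun y => decide (p y)) t :=
        List.filter_cons_of_neg (by simpa using hy)
      rw [List.foldl_cons, if_neg hy, hfy]
      exact ih b

lemma pv_foldl_min_const (l : List Int) : ∀ (c : Int), (∀ a ∈ l, c ≤ a) → l.foldl min c = c := by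
  induction l with
  | nil => intro c _; rfl
  | cons a t ih =>
    intro c h
    rw [List.foldl_cons, min_eq_left (h a (List.mem_cons_self))]
    exact ih c (fun x hx => h x (List.mem_cons_of_mem a hx))

lemma pv_foldl_min_eq (l : List Int) : ∀ (b m : Int), m ∈ l → (∀ a ∈ l, m ≤ a) →
    l.foldl min b = min b m := by
  induction l with
  | nil => intro b m hm; cases hm
  | cons a t ih =>
    intro b m hm hlb
    rw [List.foldl_cons]
    by_cases hmt : m ∈ t
    · rw [ih (min b a) m hmt (fun x hx => hlb x (List.mem_cons_of_mem a hx)),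
        min_assoc, min_eq_right (hlb a (List.mem_cons_self))]
    · have ham : a = m := by
        rcases List.mem_cons.mp hm with h' | h'
        · exact h'.symm
        · exact absurd h' hmt
      subst ham
      rw [pv_foldl_min_const t (min b a)
        (fun x hx => le_trans (min_le_right b a) (hlb x (List.mem_cons_of_mem a hx)))]

-- distinct values of a list, as PySem.Set
lemma pvOfList_sublist (l : List Int) : (PySem.Set.ofList l).Sublist l := by
  induction l using List.reverseRecOn with
  | nil => simp [PySem.Set.ofList]
  | append_singleton P u ih =>
    rw [PySem.Set.ofList_eq_foldl, List.foldl_append, ← PySem.Set.ofList_eq_foldl]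
    show (PySem.Set.add (PySem.Set.ofList P) u).Sublist (P ++ [u])
    by_cases hu : u ∈ P
    · have : PySem.Set.contains (PySem.Set.ofList P) u = true := by
        simp [PySem.Set.contains, PySem.Set.mem_ofList, hu]
      simp only [PySem.Set.add, this, if_true]
      exact ih.trans (List.sublist_append_left P [u])
    · have : PySem.Set.contains (PySem.Set.ofList P) u = false := by
        simp [PySem.Set.contains, PySem.Set.mem_ofList, hu]
      simp only [PySem.Set.add, this, Bool.false_eq_true, if_false]
      exact ih.append (List.Sublist.refl [u])

lemma pvOfList_pairwise_lt (l : List Int) (h : l.Pairwise (· ≤ ·)) :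
    (PySem.Set.ofList l).Pairwise (· < ·) := by
  have hle : (PySem.Set.ofList l).Pairwise (· ≤ ·) := h.sublist (pvOfList_sublist l)
  have hne : (PySem.Set.ofList l).Pairwise (· ≠ ·) := PySem.Set.nodup_ofList l
  exact (hle.and hne).imp (fun h => lt_of_le_of_ne h.1 h.2)

-- elements of a ≤-sorted list are monotone in the index
lemma pv_getElem_mono (A' : List Int) (hle : A'.Pairwise (· ≤ ·)) :
    ∀ (m n : Nat) (hm : m < A'.length) (hn : n < A'.length), m ≤ n → A'[m] ≤ A'[n] := by
  intro m n hm hn hmn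
  rcases Nat.lt_or_eq_of_le hmn with h | h
  · exact (List.pairwise_iff_getElem.mp hle) m n hm hn h
  · subst h; exact le_refl _

-- Source B's inner pointer loop finds the least index whose element squares to ≥ x
lemma pvBadv_eq (A' : List Int) (x : Int) (j : Nat)
    (hex : ∃ (m : Nat) (hm : m < A'.length), j ≤ m ∧ x ≤ A'[m] * A'[m])
    (hinv : ∀ (m : Nat) (hm : m < A'.length), m < j → A'[m] * A'[m] < x) :
    pvBadv A' x j = A'.findIdx (fun v => decide (x ≤ v * v)) := by
  have hjlt : j < A'.length := by
    rcases hex with ⟨m, hm, hjm, _⟩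
    omega
  unfold pvBadv
  rw [dif_pos hjlt]
  by_cases hcase : A'[j] * A'[j] < x
  · rw [if_pos hcase]
    refine pvBadv_eq A' x (j + 1) ?_ ?_
    · rcases hex with ⟨m, hm, hjm, hmx⟩
      refine ⟨m, hm, ?_, hmx⟩
      rcases Nat.lt_or_eq_of_le hjm with h | h
      · omega
      · subst h; exact absurd hcase (not_lt.mpr hmx)
    · intro m hm hmj
      rcases Nat.lt_or_eq_of_le (Nat.lt_succ_iff.mp hmj) with h | h
      · exact hinv m hm h
      · subst h; exact hcase
  · rw [if_neg hcase]
    exact (pv_findIdx_eq A' _ j hjlt (by simpa using not_lt.mp hcase)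
      (fun m hm hmj => by simpa using hinv m hm hmj)).symm
termination_by A'.length - j

-- Source B's duplicate-skipping loop finds the last index of the block of x
lemma pvBlast_spec (A' : List Int) (x : Int) (i : Nat) (hi : i < A'.length) (hx : A'[i] = x) :
    pvBlast A' x i < A'.length ∧ A'[pvBlast A' x i]? = some x ∧
      (pvBlast A' x i + 1 = A'.length ∨ A'[pvBlast A' x i + 1]? ≠ some x) := by
  unfold pvBlast
  split
  · rename_i h1
    by_cases hc : A'[i + 1] = x
    · rw [if_pos hc]
      exact pvBlast_spec A' x (i + 1) h1 hc
    · rw [if_neg hc]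
      refine ⟨hi, by rw [List.getElem?_eq_getElem hi, hx], Or.inr ?_⟩
      rw [List.getElem?_eq_getElem h1]
      simpa using hc
  · rename_i h1
    exact ⟨hi, by rw [List.getElem?_eq_getElem hi, hx], Or.inl (by omega)⟩
termination_by A'.length - i

-- the distinct values still to be processed when the sweep stands at index i
def pvRem (A' : List Int) (i : Nat) : List Int :=
  match A'[i]? with
  | some x => (PySem.Set.ofList A').filter (fun v => decide (x ≤ v))
  | none => []

lemma pv_filter_split (l : List Int) (hlt : l.Pairwise (· < ·)) (x : Int) (hx : x ∈ l) :
    l.filter (fun v => decide (x ≤ v)) = x :: l.filter (fun v => decide (x < v)) := by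
  induction l with
  | nil => cases hx
  | cons a t ih =>
    rcases List.pairwise_cons.mp hlt with ⟨hat, hlt'⟩
    by_cases hax : a = x
    · subst hax
      rw [List.filter_cons_of_pos (by simp), List.filter_cons_of_neg (by simp)]
      congr 1
      apply List.filter_congr
      intro v hv
      have : a < v := hat v hv
      simp only [decide_eq_decide]
      omega
    · have hxt : x ∈ t := by
        rcases List.mem_cons.mp hx with h' | h'
        · exact absurd h'.symm hax
        · exact h'
      have hax' : a < x := hat x hxt
      rw [List.filter_cons_of_neg (by simpa using not_le.mpr hax'),
        List.filter_cons_of_neg (by simpa using not_lt.mpr hax'.le)]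
      exact ih hlt' hxt

-- the B sweep computes the spec fold over the remaining distinct values
lemma pvBloop_eq (A' : List Int) (hle : A'.Pairwise (· ≤ ·)) (i j : Nat) (b : Int)
    (hblock : ∀ (m : Nat) (hm : m < A'.length) (hi : i < A'.length), m < i → A'[m] < A'[i])
    (hj : ∀ (hi : i < A'.length) (m : Nat) (hm : m < A'.length), m < j → A'[m] * A'[m] < A'[i])
    (hji : i < A'.length → j ≤ i) :
    pvBloop A' ((A'.length : Int)) i j b = (pvRem A' i).foldl (pvStep A') b := by
  have hmono := pv_getElem_mono A' hle
  have hSlt : (PySem.Set.ofList A').Pairwise (· < ·) := pvOfList_pairwise_lt A' hle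
  unfold pvBloop
  split
  · rename_i hi
    -- current value
    have hx : A'[i] = A'[i] := rfl
    -- the pointer loop
    have hjeq : pvBadv A' A'[i] j = A'.findIdx (fun v => decide (A'[i] ≤ v * v)) :=
      pvBadv_eq A' A'[i] j ⟨i, hi, hji hi, pv_int_le_sq A'[i]⟩ (fun m hm hmj => hj hi m hm hmj)
    obtain ⟨hjlt, hjp, hjmin⟩ := pv_findIdx_spec A' (fun v => decide (A'[i] ≤ v * v))
      ⟨i, hi, by simpa using pv_int_le_sq A'[i]⟩
    have hjAi : A'.findIdx (fun v => decide (A'[i] ≤ v * v)) ≤ i := by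
      by_contra hcon
      exact (hjmin i hi (by omega)) (by simpa using pv_int_le_sq A'[i])
    -- the block loop
    obtain ⟨hi2lt, hx2q, hnext⟩ := pvBlast_spec A' A'[i] i hi rfl
    have hx2 : A'[pvBlast A' A'[i] i]'hi2lt = A'[i] := by
      rw [List.getElem?_eq_getElem hi2lt] at hx2q
      simpa using hx2q
    have hi2ge : i ≤ pvBlast A' A'[i] i := pvBlast_le A' A'[i] i
    -- elements ≤ the block end are ≤ x, elements after are > x
    have hpre : ∀ (m : Nat) (hm : m < A'.length), m ≤ pvBlast A' A'[i] i → A'[m] ≤ A'[i] := by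
      intro m hm hmle
      calc A'[m] ≤ A'[pvBlast A' A'[i] i]'hi2lt := hmono m _ hm hi2lt hmle
      _ = A'[i] := hx2
    have hpost : ∀ (m : Nat) (hm : m < A'.length), pvBlast A' A'[i] i < m → A'[i] < A'[m] := by
      intro m hm hmgt
      have h3 : pvBlast A' A'[i] i + 1 < A'.length := by omega
      have hne : A'[pvBlast A' A'[i] i + 1]'h3 ≠ A'[i] := by
        rcases hnext with h' | h'
        · omega
        · exact fun he => h' (by rw [List.getElem?_eq_getElem h3, he])
      have hge : A'[i] ≤ A'[pvBlast A' A'[i] i + 1]'h3 := by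
        calc A'[i] = A'[pvBlast A' A'[i] i]'hi2lt := hx2.symm
        _ ≤ _ := hmono _ _ hi2lt h3 (by omega)
      have hlt1 : A'[i] < A'[pvBlast A' A'[i] i + 1]'h3 := lt_of_le_of_ne hge (Ne.symm hne)
      exact lt_of_lt_of_le hlt1 (hmono _ m h3 hm (by omega))
    -- the candidate equals the spec candidate
    have hcount : A'.countP (fun a => decide (A'[i] < a)) = A'.length - (pvBlast A' A'[i] i + 1) := by
      apply pv_countP_suffix
      · omega
      · intro m hm hmj
        simpa using not_lt.mpr (hpre m hm (by omega))
      · intro m hm hmj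
        simpa using hpost m hm (by omega)
    have hcand : ((A'.length : Int) - 1 - (pvBlast A' A'[i] i : Int)) + (pvBadv A' A'[i] j : Int)
        = ((A'.countP (fun a => decide (A'[i] < a)) : Nat) : Int)
          + ((A'.findIdx (fun v => decide (A'[i] ≤ v * v)) : Nat) : Int) := by
      rw [hcount, hjeq]
      have : pvBlast A' A'[i] i + 1 ≤ A'.length := by omega
      push_cast [Nat.cast_sub this]
      ring
    -- the remaining-values list splits off x
    have hxS : A'[i] ∈ PySem.Set.ofList A' := (PySem.Set.mem_ofList _ _).mpr (List.getElem_mem hi)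
    have hrem : pvRem A' i = A'[i] :: pvRem A' (pvBlast A' A'[i] i + 1) := by
      have h0 : pvRem A' i
          = (PySem.Set.ofList A').filter (fun v => decide (A'[i] ≤ v)) := by
        unfold pvRem
        rw [List.getElem?_eq_getElem hi]
      rw [h0, pv_filter_split _ hSlt _ hxS]
      congr 1
      by_cases h2l : pvBlast A' A'[i] i + 1 < A'.length
      · unfold pvRem
        rw [List.getElem?_eq_getElem h2l]
        apply List.filter_congr
        intro v hv
        obtain ⟨m, hm, rfl⟩ := List.mem_iff_getElem.mp ((PySem.Set.mem_ofList _ _).mp hv)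
        simp only [decide_eq_decide]
        constructor
        · intro hlt2
          have hmgt : pvBlast A' A'[i] i < m := by
            by_contra hcon
            exact absurd (hpre m hm (by omega)) (not_le.mpr hlt2)
          exact hmono _ m h2l hm (by omega)
        · intro hge2
          exact lt_of_lt_of_le (hpost _ h2l (by omega)) hge2
      · have hnone : pvRem A' (pvBlast A' A'[i] i + 1) = [] := by
          unfold pvRem
          rw [List.getElem?_eq_none (by omega)]
        rw [hnone]
        apply List.filter_eq_nil_iff.mpr
        intro v hv
        obtain ⟨m, hm, rfl⟩ := List.mem_iff_getElem.mp ((PySem.Set.mem_ofList _ _).mp hv)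
        simpa using not_lt.mpr (hpre m hm (by omega))
    -- recurse
    rw [pvBloop_eq A' hle (pvBlast A' A'[i] i + 1) (pvBadv A' A'[i] j)
        (min b (((A'.length : Int) - 1 - (pvBlast A' A'[i] i : Int)) + (pvBadv A' A'[i] j : Int)))
        ?_ ?_ ?_]
    · rw [hrem, List.foldl_cons, hcand]
      rfl
    · intro m hm h2l hmlt
      exact lt_of_le_of_lt (hpre m hm (by omega)) (hpost _ h2l (by omega))
    · intro h2l m hm hmj
      rw [hjeq] at hmj
      have hfail := hjmin m hm hmj
      have : A'[m] * A'[m] < A'[i] := by simpa using hfail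
      exact lt_trans this (hpost _ h2l (by omega))
    · intro h2l
      rw [hjeq]
      omega
  · rename_i hi
    have hnone : pvRem A' i = [] := by
      unfold pvRem
      rw [List.getElem?_eq_none (by omega)]
    rw [hnone]
    rfl
termination_by A'.length - i
decreasing_by have := pvBlast_le A' A'[i] i; omega

-- A's program equals the spec fold
lemma pvA_eq (A0 : List Int) :
    min_remove A0 = pvSpec (PySem.List.sorted A0 (fun x => x) false) := by
  simp only [min_remove, pvSpec]
  set A' := PySem.List.sorted A0 (fun x => x) false with hA'
  have hle : A'.Pairwise (· ≤ ·) := PySem.List.sorted_pairwise A0 (fun x => x)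
  have hmono := pv_getElem_mono A' hle
  have hS : PySem.List.sorted (PySem.Set.ofList A') (fun x => x) false = PySem.Set.ofList A' :=
    PySem.List.sorted_eq_of_perm_of_pairwise_lt _ _ _ (List.Perm.refl _)
      (pvOfList_pairwise_lt A' hle)
  rw [hS]
  set S := PySem.Set.ofList A' with hSdef
  have hSlt : S.Pairwise (· < ·) := pvOfList_pairwise_lt A' hle
  have hfold : S.foldl (pvStep A') ((A'.length : Int))
      = (PySem.List.enumerate S 0).foldl (fun b p => pvStep A' b p.2) ((A'.length : Int)) := by
    conv_lhs => rw [← PySem.List.map_snd_enumerate S 0]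
    rw [List.foldl_map]
  rw [hfold]
  apply PySem.List.foldl_congr_mem
  intro acc ix hix
  obtain ⟨k, hk, hix2⟩ := (PySem.List.mem_enumerate_iff _ _ _).mp hix
  subst hix2
  simp only [zero_add]
  -- replace the reversed-list index by a count of greater elements
  rw [PySem.List.slice?_none_none_neg_one]
  simp only [Option.getD_some]
  have hxA : S[k] ∈ A' := (PySem.Set.mem_ofList _ _).mp (List.getElem_mem hk)
  rw [pv_index?_rev_sorted A' hle S[k] hxA]
  simp only [Option.getD_some]
  -- inner loop over indices j = loop over T = S.take (k + 1)
  have h1 : ((k : Int) + 1) = (((k + 1 : Nat)) : Int) := by push_cast; ring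
  set T := S.take (k + 1) with hT
  have htake_len : T.length = k + 1 := by rw [hT, List.length_take]; omega
  have hstep0 :
      (PySem.List.pyRange 0 (((k + 1 : Nat)) : Int) 1).foldl (fun acc j =>
        if S[k] ≤ (PySem.List.pyGetD S j 0) ^ 2 then
          min acc
            (((A'.countP (fun a => decide (S[k] < a)) : Nat) : Int)
              + (((PySem.List.index? A' (PySem.List.pyGetD S j 0)).getD 0 : Nat) : Int))
        else acc) acc
      = (PySem.List.pyRange 0 (((k + 1 : Nat)) : Int) 1).foldl (fun acc j =>
        if S[k] ≤ (PySem.List.pyGetD T j 0) ^ 2 then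
          min acc
            (((A'.countP (fun a => decide (S[k] < a)) : Nat) : Int)
              + (((PySem.List.index? A' (PySem.List.pyGetD T j 0)).getD 0 : Nat) : Int))
        else acc) acc := by
    apply PySem.List.foldl_congr_mem
    intro acc2 j hj
    have hjb := PySem.List.mem_pyRange_one.mp hj
    have hget : PySem.List.pyGetD S j 0 = PySem.List.pyGetD T j 0 := by
      have hj0 : 0 ≤ j := hjb.1
      have hjlt : j.toNat < k + 1 := by omega
      rw [PySem.List.pyGetD_of_nonneg S 0 hj0, PySem.List.pyGetD_of_nonneg T 0 hj0, hT]
      simp [List.getD_eq_getElem?_getD, hjlt]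
    rw [hget]
  rw [h1, hstep0, ← htake_len]
  rw [PySem.List.foldl_pyRange_zero_pyGetD' (d := 0) (xs := T) (init := acc)
    (f := fun acc y =>
      if S[k] ≤ y ^ 2 then
        min acc
          (((A'.countP (fun a => decide (S[k] < a)) : Nat) : Int)
            + (((PySem.List.index? A' y).getD 0 : Nat) : Int))
      else acc)]
  -- facts about the least valid partner y0 = A'[jA]
  obtain ⟨mx, hmx, hmxv⟩ := List.mem_iff_getElem.mp hxA
  obtain ⟨hjlt, hjp, hjmin⟩ := pv_findIdx_spec A' (fun v => decide (S[k] ≤ v * v))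
    ⟨mx, hmx, by rw [hmxv]; simpa using pv_int_le_sq S[k]⟩
  set jA := A'.findIdx (fun v => decide (S[k] ≤ v * v)) with hjAdef
  have hy0A : A'[jA] ∈ A' := List.getElem_mem hjlt
  have hy0p : S[k] ≤ A'[jA] * A'[jA] := by simpa using hjp
  have hy0x : A'[jA] ≤ S[k] := by
    have hja_le : jA ≤ mx := by
      by_contra hcon
      exact (hjmin mx hmx (by omega)) (by rw [hmxv]; simpa using pv_int_le_sq S[k])
    calc A'[jA] ≤ A'[mx] := hmono _ _ _ _ hja_le
    _ = S[k] := hmxv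
  have hleast : ∀ y, y ∈ A' → S[k] ≤ y * y → A'[jA] ≤ y := by
    intro y hy hyp
    obtain ⟨m, hm, rfl⟩ := List.mem_iff_getElem.mp hy
    by_contra hcon
    push_neg at hcon
    have hmj : m < jA := by
      by_contra h2
      exact absurd (hmono jA m hjlt hm (by omega)) (not_le.mpr hcon)
    exact (hjmin m hm hmj) (by simpa using hyp)
  have hjcount : A'.countP (fun a => decide (a < A'[jA])) = jA := by
    apply pv_countP_block A' _ jA (by omega)
    · intro m hm hmj
      have hne : A'[m] ≠ A'[jA] := by
        intro he
        exact (hjmin m hm hmj) (by rw [he]; simpa using hy0p)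
      simpa using lt_of_le_of_ne (hmono m jA hm hjlt (by omega)) hne
    · intro m hm hmj
      simpa using not_lt.mpr (hmono jA m hjlt hm hmj)
  -- y0 lies in T
  have hy0S : A'[jA] ∈ S := (PySem.Set.mem_ofList _ _).mpr hy0A
  obtain ⟨ms, hms, hmsv⟩ := List.mem_iff_getElem.mp hy0S
  have hmsk : ms < k + 1 := by
    by_contra hcon
    have hlt2 : S[k] < S[ms] := (List.pairwise_iff_getElem.mp hSlt) k ms hk hms (by omega)
    rw [hmsv] at hlt2
    exact absurd hlt2 (not_lt.mpr hy0x)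
  have hy0T : A'[jA] ∈ T := by
    have h' : ms < T.length := by omega
    have he : T[ms]'h' = S[ms] := by simp [hT]
    rw [← hmsv, ← he]
    exact List.getElem_mem h'
  -- collapse the conditional min-fold to its minimum
  rw [pv_foldl_if_min (fun y => S[k] ≤ y ^ 2)
    (fun y => ((A'.countP (fun a => decide (S[k] < a)) : Nat) : Int)
      + (((PySem.List.index? A' y).getD 0 : Nat) : Int)) T acc]
  rw [pv_foldl_min_eq _ acc
    (((A'.countP (fun a => decide (S[k] < a)) : Nat) : Int)
      + (((PySem.List.index? A' A'[jA]).getD 0 : Nat) : Int))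
    ?_ ?_]
  · rw [pv_index?_sorted A' hle A'[jA] hy0A]
    simp only [Option.getD_some]
    rw [hjcount]
    simp only [pvStep, ← hjAdef]
  · exact List.mem_map.mpr ⟨A'[jA],
      List.mem_filter.mpr ⟨hy0T, by simp only [pow_two, decide_eq_true_eq]; exact hy0p⟩, rfl⟩
  · intro a ha
    obtain ⟨y, hyf, rfl⟩ := List.mem_map.mp ha
    obtain ⟨hyT, hyp⟩ := List.mem_filter.mp hyf
    have hyp' : S[k] ≤ y * y := by
      have := of_decide_eq_true hyp
      rwa [pow_two] at this
    have hyA : y ∈ A' := (PySem.Set.mem_ofList _ _).mp (List.mem_of_mem_take (hT ▸ hyT))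
    have hy0y : A'[jA] ≤ y := hleast y hyA hyp'
    rw [pv_index?_sorted A' hle y hyA, pv_index?_sorted A' hle A'[jA] hy0A]
    simp only [Option.getD_some]
    have hmle : List.countP (fun a => decide (a < A'[jA])) A'
        ≤ List.countP (fun a => decide (a < y)) A' :=
      List.countP_mono_left (fun a _ h => by
        simp only [decide_eq_true_eq] at h ⊢
        exact lt_of_lt_of_le h hy0y)
    omega

-- B's program equals the spec fold
lemma pvB_eq (A0 : List Int) :
    min_remove_alt A0 = pvSpec (PySem.List.sorted A0 (fun x => x) false) := by
  simp only [min_remove_alt, pvSpec]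
  set A' := PySem.List.sorted A0 (fun x => x) false with hA'
  have hle : A'.Pairwise (· ≤ ·) := PySem.List.sorted_pairwise A0 (fun x => x)
  rw [pvBloop_eq A' hle 0 0 ((A'.length : Int)) (by omega) (by omega) (by omega)]
  cases hA : A' with
  | nil => rfl
  | cons a t =>
    have h0 : (0 : Nat) < A'.length := by rw [hA]; simp
    have hrem : pvRem A' 0 = PySem.Set.ofList A' := by
      unfold pvRem
      rw [List.getElem?_eq_getElem h0]
      apply List.filter_eq_self.mpr
      intro v hv
      obtain ⟨m, hm, rfl⟩ := List.mem_iff_getElem.mp ((PySem.Set.mem_ofList _ _).mp hv)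
      simpa using pv_getElem_mono A' hle 0 m h0 hm (by omega)
    rw [← hA, hrem]

theorem pv_main (A0 : List Int) : min_remove A0 = min_remove_alt A0 := by
  rw [pvA_eq, pvB_eq]

-- ===== VERDICT (by name: the statement is the Claim_ definition above) =====
theorem min_remove_spec : Claim_equal_min_remove := by
  intro A _
  exact pv_main A
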